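-- pv_equiv track=rewrite | github.com/malachikarczmar/COMP170_Spring25_FinalProject | Login Creator - Warnings Removed.py | check_fname
-- ===== SOURCE A (Python) =====
-- def check_fname(lowercase_fname): #Checks that the first names truth value (must be empty of special characters and numbers). True/False will be used to determine whether to prompt the user again or use the input given
--     hasDigit = False
--     hasSpecial = False
--     special = '''!@$%^&*()_-+={[}]|\\:;"'<,>.\\#'''
--     for letter in lowercase_fname:
--         if letter.isdigit():
--             hasDigit = True
--             break
--     for letter in lowercase_fname:
--         if letter in special:
--             hasSpecial = True
--             break
--     return hasDigit, hasSpecial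
-- ===== SOURCE B (Python) =====
-- def check_fname(lowercase_fname):
--     # Single fused pass over the string maintaining both flags, with early exit
--     # once both are set (A does two separate scans).
--     hasDigit = False
--     hasSpecial = False
--     special = '''!@$%^&*()_-+={[}]|\\:;"'<,>.\\#'''
--     for letter in lowercase_fname:
--         hasDigit = hasDigit or letter.isdigit()
--         hasSpecial = hasSpecial or letter in special
--         if hasDigit and hasSpecial:
--             break
--     return hasDigit, hasSpecial
-- ===== Notes on version B (the rewrite author's own statement) =====
-- stated objective: alternative
-- what changed: Replaced A's two independent early-exit scans (one for digits, one for special characters) with a single fused pass that updates both flags per character and breaks once both are true.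
import Mathlib
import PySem

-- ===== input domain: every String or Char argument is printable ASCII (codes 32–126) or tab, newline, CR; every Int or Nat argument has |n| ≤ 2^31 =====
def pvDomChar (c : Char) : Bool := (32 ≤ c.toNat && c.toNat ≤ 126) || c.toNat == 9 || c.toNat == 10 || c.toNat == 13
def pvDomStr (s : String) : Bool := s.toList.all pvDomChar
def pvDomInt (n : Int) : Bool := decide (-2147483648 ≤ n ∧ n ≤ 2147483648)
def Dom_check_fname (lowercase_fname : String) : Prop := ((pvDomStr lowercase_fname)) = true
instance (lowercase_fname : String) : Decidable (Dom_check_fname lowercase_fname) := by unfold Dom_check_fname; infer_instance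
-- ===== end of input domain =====

-- B fuses A's two separate early-exit scans into one pass with two flags; same values, not faster.

-- ===== PORT A =====
-- the `special` character string literal of A
def pvSpecial : List Char := "!@$%^&*()_-+={[}]|\\:;\"'<,>.\\#".toList

-- first loop: `for letter in …: if letter.isdigit(): hasDigit = True; break`
def pvLoopDigit : List Char → Bool
  | [] => false
  | c :: rest => if PySem.Chars.isdigit c then true else pvLoopDigit rest

-- second loop: `if letter in special: hasSpecial = True; break` (`letter in special`
-- for the single character `letter` is membership in `special`'s characters — exact)
def pvLoopSpecial : List Char → Bool
  | [] => false
  | c :: rest => if pvSpecial.contains c then true else pvLoopSpecial rest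

def check_fname (lowercase_fname : String) : Bool × Bool :=
  (pvLoopDigit lowercase_fname.toList, pvLoopSpecial lowercase_fname.toList)

-- ===== PORT B =====
-- single fused loop carrying both flags, breaking once both are set
def pvLoopBoth : List Char → Bool → Bool → Bool × Bool
  | [], hasDigit, hasSpecial => (hasDigit, hasSpecial)
  | c :: rest, hasDigit, hasSpecial =>
    let hd := hasDigit || PySem.Chars.isdigit c
    let hs := hasSpecial || pvSpecial.contains c
    if hd && hs then (hd, hs) else pvLoopBoth rest hd hs

def check_fname_alt (lowercase_fname : String) : Bool × Bool :=
  pvLoopBoth lowercase_fname.toList false false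

-- ===== PRECONDITION & SPEC =====
def Spec_check_fname (lowercase_fname : String) (out : Bool × Bool) : Prop := out = check_fname_alt lowercase_fname
instance (lowercase_fname : String) (out : Bool × Bool) : Decidable (Spec_check_fname lowercase_fname out) := by unfold Spec_check_fname; infer_instance

-- ===== CLAIM (what is proved, stated in full; the proofs are below) =====
def Claim_equal_check_fname : Prop := ∀ (lowercase_fname : String), Dom_check_fname lowercase_fname → Spec_check_fname lowercase_fname (check_fname lowercase_fname)

-- ===== LEMMAS AND PROOFS =====

theorem pvLoopDigit_eq_any (cs : List Char) : pvLoopDigit cs = cs.any PySem.Chars.isdigit := by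
  induction cs with
  | nil => rfl
  | cons c rest ih => simp [pvLoopDigit, ih]

theorem pvLoopSpecial_eq_any (cs : List Char) : pvLoopSpecial cs = cs.any pvSpecial.contains := by
  induction cs with
  | nil => rfl
  | cons c rest ih => simp [pvLoopSpecial, ih]

theorem pvLoopBoth_eq (cs : List Char) (hd hs : Bool) :
    pvLoopBoth cs hd hs = (hd || cs.any PySem.Chars.isdigit, hs || cs.any pvSpecial.contains) := by
  induction cs generalizing hd hs with
  | nil => simp [pvLoopBoth]
  | cons c rest ih =>
    simp only [pvLoopBoth, List.any_cons]
    by_cases h : (hd || PySem.Chars.isdigit c) && (hs || pvSpecial.contains c)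
    · rw [if_pos h]
      rcases (Bool.and_eq_true _ _).mp h with ⟨h1, h2⟩
      rcases Bool.or_eq_true_iff.mp h1 with h1' | h1' <;>
        rcases Bool.or_eq_true_iff.mp h2 with h2' | h2' <;> simp_all
    · rw [if_neg h, ih]
      simp [Bool.or_assoc]

theorem check_fname_spec : Claim_equal_check_fname := by
  intro s _
  unfold Spec_check_fname check_fname check_fname_alt
  rw [pvLoopBoth_eq, pvLoopDigit_eq_any, pvLoopSpecial_eq_any]
  simp
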